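-- pv_equiv track=rewrite | github.com/MaGGisteRP/LANG_py | 2.1.py | create_sierpinski
-- ===== SOURCE A (Python) =====
-- def create_sierpinski(level, triangle):
--     if level == 0:
--         return triangle
--     else:
--         length = len(triangle)
--         top = create_sierpinski(level - 1, triangle)
--         middle = create_sierpinski(level - 1, [row + ' ' * length + row for row in triangle])
--         bottom = create_sierpinski(level - 1, triangle)
--         return top + middle + bottom
-- ===== SOURCE B (Python) =====
-- def create_sierpinski(level, triangle):
--     # DP bottom-up: tables[j] holds the level-k fractal of the j-times-widened
--     # triangle; the duplicate top/bottom recursive call of A is computed once.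
--     pad = ' ' * len(triangle)
--     tables = [triangle]
--     for _ in range(level):
--         tables.append([row + pad + row for row in tables[-1]])
--     for _ in range(level):
--         tables = [tables[j] + tables[j + 1] + tables[j] for j in range(len(tables) - 1)]
--     return tables[0]
-- ===== Notes on version B (the rewrite author's own statement) =====
-- stated objective: faster
-- what changed: Replaces A's triple recursion (which recomputes the identical top/bottom subtree at every level) by a bottom-up DP over a table of widened triangles, building each distinct sub-fractal once.
import Mathlib
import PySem

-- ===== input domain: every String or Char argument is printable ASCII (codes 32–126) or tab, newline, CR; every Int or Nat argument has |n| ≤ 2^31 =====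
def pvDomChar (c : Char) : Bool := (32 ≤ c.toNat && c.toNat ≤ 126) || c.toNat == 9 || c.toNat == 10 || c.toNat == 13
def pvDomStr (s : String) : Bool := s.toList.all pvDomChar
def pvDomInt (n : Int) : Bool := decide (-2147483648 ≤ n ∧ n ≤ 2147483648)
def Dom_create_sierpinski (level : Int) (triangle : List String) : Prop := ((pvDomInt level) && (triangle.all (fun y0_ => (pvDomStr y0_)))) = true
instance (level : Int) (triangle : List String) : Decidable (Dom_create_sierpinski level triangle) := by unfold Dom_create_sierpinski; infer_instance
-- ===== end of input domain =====

-- B replaces A's triple recursion (recomputing the identical top/bottom subtree) by a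
-- bottom-up DP table of widened triangles; objective: faster (asymptotic, by a factor level).

-- ===== PORT A =====
-- ' ' * n  (n ≥ 0 here, since it is a list length): ported by hand as replicate, exact.
def pyPad (n : Nat) : String := String.ofList (List.replicate n ' ')

def create_sierpinski (level : Int) (triangle : List String) : List String :=
  if _h0 : level = 0 then triangle
  else if _hn : level < 0 then []   -- Python recurses forever here; excluded by Pre_ (totality guard only)
  else
    let length := triangle.length
    let top := create_sierpinski (level - 1) triangle
    let middle := create_sierpinski (level - 1) (triangle.map (fun row => row ++ pyPad length ++ row))
    let bottom := create_sierpinski (level - 1) triangle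
    top ++ middle ++ bottom
termination_by level.toNat
decreasing_by all_goals simp_wf; omega

-- ===== PORT B =====
def pvWiden (pad : String) (t : List String) : List String :=
  t.map (fun row => row ++ pad ++ row)

-- tables = [t, w t, w² t, …, w^k t]  (the first loop of Source B)
def pvBuildTables (k : Nat) (pad : String) (t : List String) : List (List String) :=
  match k with
  | 0 => [t]
  | k + 1 => t :: pvBuildTables k pad (pvWiden pad t)

-- the second loop of Source B: k combining passes, each pass is the comprehension
-- [tables[j] + tables[j+1] + tables[j] for j in range(len(tables)-1)]
def pvIterCombine (k : Nat) (ts : List (List String)) : List (List String) :=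
  match k with
  | 0 => ts
  | k + 1 => pvIterCombine k (List.zipWith (fun a b => a ++ b ++ a) ts ts.tail)

def create_sierpinski_alt (level : Int) (triangle : List String) : List String :=
  let pad := pyPad triangle.length
  (pvIterCombine level.toNat (pvBuildTables level.toNat pad triangle)).headD []

-- ===== PRECONDITION & SPEC =====
-- Pre_ excludes level < 0, where Python A never returns (it recurses forever and hits RecursionError).
def Pre_create_sierpinski (level : Int) (triangle : List String) : Prop := 0 ≤ level
instance (level : Int) (triangle : List String) : Decidable (Pre_create_sierpinski level triangle) := by unfold Pre_create_sierpinski; infer_instance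

def pvWitness_create_sierpinski : Int × List String := (2, ["*"])

def Spec_create_sierpinski (level : Int) (triangle : List String) (out : List String) : Prop := out = create_sierpinski_alt level triangle
instance (level : Int) (triangle : List String) (out : List String) : Decidable (Spec_create_sierpinski level triangle out) := by unfold Spec_create_sierpinski; infer_instance

-- ===== CLAIM (what is proved, stated in full; the proofs are below) =====
def Claim_equal_create_sierpinski : Prop := ∀ (level : Int) (triangle : List String), Dom_create_sierpinski level triangle → Pre_create_sierpinski level triangle → Spec_create_sierpinski level triangle (create_sierpinski level triangle)

-- ===== LEMMAS AND PROOFS =====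

-- the recursive combinator A actually computes (pad is fixed: widening keeps the row count)
def pvComb (k : Nat) (pad : String) (t : List String) : List String :=
  match k with
  | 0 => t
  | k + 1 => pvComb k pad t ++ pvComb k pad (pvWiden pad t) ++ pvComb k pad t

-- table of pvComb values: [comb k t, comb k (w t), …, comb k (w^m t)]
def pvCombTables (k m : Nat) (pad : String) (t : List String) : List (List String) :=
  match m with
  | 0 => [pvComb k pad t]
  | m + 1 => pvComb k pad t :: pvCombTables k m pad (pvWiden pad t)

theorem pvBuildTables_eq_combTables (k : Nat) (pad : String) (t : List String) :
    pvBuildTables k pad t = pvCombTables 0 k pad t := by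
  induction k generalizing t with
  | zero => rfl
  | succ k ih => simp [pvBuildTables, pvCombTables, pvComb, ih]

theorem pvCombTables_ne_nil (k m : Nat) (pad : String) (t : List String) :
    pvCombTables k m pad t ≠ [] := by
  cases m <;> simp [pvCombTables]

theorem pvCombTables_step (k m : Nat) (pad : String) (t : List String) :
    List.zipWith (fun a b => a ++ b ++ a) (pvCombTables k (m + 1) pad t) (pvCombTables k (m + 1) pad t).tail
      = pvCombTables (k + 1) m pad t := by
  induction m generalizing t with
  | zero => simp [pvCombTables, pvComb]
  | succ m ih =>
    have h := ih (pvWiden pad t)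
    simp only [pvCombTables, List.tail_cons] at *
    cases hm : pvCombTables k m pad (pvWiden pad (pvWiden pad t)) with
    | nil => exact absurd hm (pvCombTables_ne_nil _ _ _ _)
    | cons x xs =>
      simp only [hm, List.zipWith] at h ⊢
      rw [h]
      rfl

theorem pvIterCombine_combTables (k j m : Nat) (pad : String) (t : List String) :
    pvIterCombine k (pvCombTables j (k + m) pad t) = pvCombTables (j + k) m pad t := by
  induction k generalizing j m with
  | zero => simp [pvIterCombine]
  | succ k ih =>
    have : k + 1 + m = (k + m) + 1 := by omega
    rw [this]
    show pvIterCombine k (List.zipWith _ _ _) = _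
    rw [pvCombTables_step j (k + m) pad t]
    have h := ih (j + 1) m
    rw [h]
    congr 1
    omega

theorem pvWiden_length (pad : String) (t : List String) : (pvWiden pad t).length = t.length := by
  simp [pvWiden]

theorem create_sierpinski_eq_comb (k : Nat) (t : List String) :
    create_sierpinski (k : Int) t = pvComb k (pyPad t.length) t := by
  induction k generalizing t with
  | zero => simp [create_sierpinski, pvComb]
  | succ k ih =>
    rw [create_sierpinski]
    have h0 : ((k + 1 : Nat) : Int) ≠ 0 := by omega
    have h1 : ¬ ((k + 1 : Nat) : Int) < 0 := by omega
    have h2 : ((k + 1 : Nat) : Int) - 1 = (k : Int) := by omega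
    simp only [h0, h1, h2, dif_neg, not_false_iff]
    have hm := ih (pvWiden (pyPad t.length) t)
    rw [pvWiden_length] at hm
    simp only [pvWiden] at hm
    simp [pvComb, ih t, pvWiden, hm]

-- ===== VERDICT (by name: the statement is the Claim_ definition above) =====
theorem create_sierpinski_alt_eq_comb (k : Nat) (t : List String) :
    create_sierpinski_alt (k : Int) t = pvComb k (pyPad t.length) t := by
  simp only [create_sierpinski_alt, Int.toNat_natCast, pvBuildTables_eq_combTables]
  have h := pvIterCombine_combTables k 0 0 (pyPad t.length) t
  simp only [Nat.add_zero, Nat.zero_add] at h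
  rw [h]
  rfl

theorem create_sierpinski_spec : Claim_equal_create_sierpinski := by
  intro level triangle _hdom hpre
  unfold Spec_create_sierpinski
  have hl : level = (level.toNat : Int) := by
    unfold Pre_create_sierpinski at hpre; omega
  rw [hl, create_sierpinski_eq_comb, create_sierpinski_alt_eq_comb]
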